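-- pv_equiv track=rewrite | github.com/benquick123/code-profiling | code/batch-2/vse-naloge-brez-testov/DN6-M-137.py | besedilo
-- ===== SOURCE A (Python) =====
-- def besedilo(tvit):
--     a = tvit.split(": ")
--     c = ""
--     for i in range(len(a)):
--         if i > 1:
--             c += ": "
--         if i != 0:
--             c += a[i]
--     return c
-- ===== SOURCE B (Python) =====
-- def besedilo(tvit):
--     idx = tvit.find(": ")
--     if idx == -1:
--         return ""
--     return tvit[idx + 2:]
-- ===== Notes on version B (the rewrite author's own statement) =====
-- stated objective: simpler
-- what changed: Replaces the split-into-pieces-and-rebuild loop with a single search for the first colon-space delimiter and one slice of everything after it (empty string when the delimiter is absent).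
import Mathlib
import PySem

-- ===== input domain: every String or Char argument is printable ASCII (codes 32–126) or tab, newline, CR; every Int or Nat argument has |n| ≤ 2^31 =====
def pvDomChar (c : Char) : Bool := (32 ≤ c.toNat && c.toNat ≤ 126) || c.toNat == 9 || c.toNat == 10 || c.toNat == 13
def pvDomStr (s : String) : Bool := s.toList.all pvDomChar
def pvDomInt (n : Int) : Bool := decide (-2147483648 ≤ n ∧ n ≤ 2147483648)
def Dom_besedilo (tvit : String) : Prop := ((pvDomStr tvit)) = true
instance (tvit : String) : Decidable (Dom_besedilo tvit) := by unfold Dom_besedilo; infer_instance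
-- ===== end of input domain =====

-- ===== PORT A =====
-- B strips everything up to and including the first ": " via find+slice instead of
-- A's split-rebuild loop; equivalence of the return values is proved below.
def besedilo (tvit : String) : String :=
  let a : List String := (PySem.Str.split? tvit ": ").getD []
  (PySem.List.pyRange 0 (a.length : Int) 1).foldl
    (fun c i =>
      let c1 := if 1 < i then c ++ ": " else c
      if i ≠ 0 then c1 ++ PySem.List.pyGetD a i "" else c1) ""

-- ===== PORT B =====
def besedilo_alt (tvit : String) : String :=
  let idx := PySem.Str.find tvit ": "
  if idx = -1 then "" else PySem.Str.slice tvit (some (idx + 2)) none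

-- ===== PRECONDITION & SPEC =====
def Spec_besedilo (tvit : String) (out : String) : Prop := out = besedilo_alt tvit
instance (tvit : String) (out : String) : Decidable (Spec_besedilo tvit out) := by unfold Spec_besedilo; infer_instance

-- ===== CLAIM (what is proved, stated in full; the proofs are below) =====
def Claim_equal_besedilo : Prop := ∀ (tvit : String), Dom_besedilo tvit → Spec_besedilo tvit (besedilo tvit)

-- ===== LEMMAS AND PROOFS =====

-- the join A's loop computes on the tail of the split
def pvJoin : List String → String
  | [] => ""
  | [x] => x
  | x :: y :: t => x ++ ": " ++ pvJoin (y :: t)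

theorem pvJoin_append (l : List String) (x : String) (h : l ≠ []) :
    pvJoin (l ++ [x]) = pvJoin l ++ ": " ++ x := by
  induction l with
  | nil => exact absurd rfl h
  | cons y t ih =>
    cases t with
    | nil => simp [pvJoin]
    | cons z t' =>
      simp only [List.cons_append, pvJoin]
      rw [show z :: (t' ++ [x]) = (z :: t') ++ [x] from rfl, ih (by simp)]
      simp [String.append_assoc]

theorem go_acc (sep : List Char) : ∀ (fuel : Nat) (l cur : List Char) (acc : List (List Char)),
    PySem.Chars.splitOn.go sep fuel l cur acc = acc.reverse ++ PySem.Chars.splitOn.go sep fuel l cur [] := by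
  intro fuel
  induction fuel with
  | zero => intro l cur acc; simp [PySem.Chars.splitOn.go]
  | succ f ih =>
    intro l cur acc
    cases l with
    | nil => simp [PySem.Chars.splitOn.go]
    | cons c rest =>
      rw [PySem.Chars.splitOn.go, PySem.Chars.splitOn.go]
      by_cases hp : sep.isPrefixOf (c :: rest) = true
      · simp only [hp, if_true]
        rw [ih _ _ (cur.reverse :: acc), ih _ _ [cur.reverse]]
        simp
      · simp only [Bool.not_eq_true] at hp
        simp only [hp, Bool.false_eq_true, if_false]
        rw [ih rest (c :: cur) acc]

theorem go_cur (sep : List Char) : ∀ (fuel : Nat) (l cur : List Char),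
    PySem.Chars.splitOn.go sep fuel l cur [] =
      List.modifyHead (cur.reverse ++ ·) (PySem.Chars.splitOn.go sep fuel l [] []) := by
  intro fuel
  induction fuel with
  | zero => intro l cur; simp [PySem.Chars.splitOn.go]
  | succ f ih =>
    intro l cur
    cases l with
    | nil => simp [PySem.Chars.splitOn.go]
    | cons c rest =>
      rw [PySem.Chars.splitOn.go, PySem.Chars.splitOn.go]
      by_cases hp : sep.isPrefixOf (c :: rest) = true
      · simp only [hp, if_true]
        rw [go_acc sep f _ [] [cur.reverse], go_acc sep f _ [] [[].reverse]]
        cases PySem.Chars.splitOn.go sep f (List.drop sep.length (c :: rest)) [] [] <;> simp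
      · simp only [Bool.not_eq_true] at hp
        simp only [hp, Bool.false_eq_true, if_false]
        rw [ih rest (c :: cur), ih rest [c]]
        cases PySem.Chars.splitOn.go sep f rest [] [] <;> simp [List.modifyHead]

theorem go_ne_nil (sep : List Char) : ∀ (fuel : Nat) (l cur : List Char) (acc : List (List Char)),
    PySem.Chars.splitOn.go sep fuel l cur acc ≠ [] := by
  intro fuel
  induction fuel with
  | zero => intro l cur acc; simp [PySem.Chars.splitOn.go]
  | succ f ih =>
    intro l cur acc
    cases l with
    | nil => simp [PySem.Chars.splitOn.go]
    | cons c rest =>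
      rw [PySem.Chars.splitOn.go]
      by_cases hp : sep.isPrefixOf (c :: rest) = true
      · simp only [hp, if_true]; exact ih _ _ _
      · simp only [Bool.not_eq_true] at hp
        simp only [hp, Bool.false_eq_true, if_false]
        exact ih _ _ _

theorem go_fuel (sep : List Char) (hsep : sep ≠ []) :
    ∀ (f1 : Nat) (l : List Char) (f2 : Nat), l.length < f1 → l.length < f2 →
    PySem.Chars.splitOn.go sep f1 l [] [] = PySem.Chars.splitOn.go sep f2 l [] [] := by
  intro f1
  induction f1 with
  | zero => intro l f2 h1 _; omega
  | succ f ih =>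
    intro l f2 h1 h2
    cases l with
    | nil =>
      cases f2 with
      | zero => omega
      | succ f2' => simp [PySem.Chars.splitOn.go]
    | cons c rest =>
      cases f2 with
      | zero => omega
      | succ f2' =>
        rw [PySem.Chars.splitOn.go, PySem.Chars.splitOn.go]
        by_cases hp : sep.isPrefixOf (c :: rest) = true
        · simp only [hp, if_true]
          rw [go_acc sep f _ [] [[].reverse], go_acc sep f2' _ [] [[].reverse]]
          have hlen : (List.drop sep.length (c :: rest)).length < f := by
            have : 1 ≤ sep.length := by
              cases sep with | nil => exact absurd rfl hsep | cons _ _ => simp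
            simp only [List.length_drop, List.length_cons] at *
            omega
          have hlen2 : (List.drop sep.length (c :: rest)).length < f2' := by
            have : 1 ≤ sep.length := by
              cases sep with | nil => exact absurd rfl hsep | cons _ _ => simp
            simp only [List.length_drop, List.length_cons] at *
            omega
          rw [ih _ f2' hlen hlen2]
        · simp only [Bool.not_eq_true] at hp
          simp only [hp, Bool.false_eq_true, if_false]
          rw [go_cur sep f rest (c :: []), go_cur sep f2' rest (c :: [])]
          rw [ih rest f2' (by simp at h1 ⊢; omega) (by simp at h2 ⊢; omega)]

theorem splitOn_nil (sep : List Char) (hsep : sep ≠ []) :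
    PySem.Chars.splitOn [] sep = [[]] := by
  simp [PySem.Chars.splitOn, PySem.Chars.splitOn.go]

theorem splitOn_cons_not_prefix (sep : List Char) (hsep : sep ≠ []) (c : Char) (rest : List Char)
    (h : ¬ sep <+: (c :: rest)) :
    PySem.Chars.splitOn (c :: rest) sep = List.modifyHead (c :: ·) (PySem.Chars.splitOn rest sep) := by
  unfold PySem.Chars.splitOn
  rw [show (c :: rest).length + 1 = (rest.length + 1) + 1 by simp]
  rw [PySem.Chars.splitOn.go]
  have hp : sep.isPrefixOf (c :: rest) = false := by
    rw [Bool.eq_false_iff]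
    intro hpf
    exact h (List.isPrefixOf_iff_prefix.mp hpf)
  simp only [hp, if_false]
  rw [go_cur sep (rest.length + 1) rest [c]]
  rfl

theorem splitOn_prefix (sep : List Char) (hsep : sep ≠ []) (l : List Char) (h : sep <+: l) :
    PySem.Chars.splitOn l sep = [] :: PySem.Chars.splitOn (l.drop sep.length) sep := by
  have hsl : 1 ≤ sep.length := by
    cases sep with | nil => exact absurd rfl hsep | cons _ _ => simp
  cases l with
  | nil =>
    exact absurd (List.prefix_nil.mp h) hsep
  | cons c rest =>
    unfold PySem.Chars.splitOn
    rw [show (c :: rest).length + 1 = (rest.length + 1) + 1 by simp]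
    rw [PySem.Chars.splitOn.go]
    have hp : sep.isPrefixOf (c :: rest) = true := List.isPrefixOf_iff_prefix.mpr h
    simp only [hp, if_true]
    rw [go_acc sep (rest.length + 1) _ [] [[].reverse]]
    rw [go_fuel sep hsep (rest.length + 1) _ ((List.drop sep.length (c :: rest)).length + 1)
      (by simp; omega) (by omega)]
    simp

theorem splitOn_not_infix (sep : List Char) (hsep : sep ≠ []) :
    ∀ (l : List Char), ¬ sep <:+: l → PySem.Chars.splitOn l sep = [l] := by
  intro l
  induction l with
  | nil => intro _; exact splitOn_nil sep hsep
  | cons c rest ih =>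
    intro h
    rw [List.infix_cons_iff] at h
    push_neg at h
    rw [splitOn_cons_not_prefix sep hsep c rest h.1, ih h.2]
    rfl

theorem splitOn_at_first (sep : List Char) (hsep : sep ≠ []) :
    ∀ (j : Nat) (l : List Char), sep <+: l.drop j → (∀ i, i < j → ¬ sep <+: l.drop i) →
    PySem.Chars.splitOn l sep = l.take j :: PySem.Chars.splitOn (l.drop (j + sep.length)) sep := by
  intro j
  induction j with
  | zero =>
    intro l h _
    simpa using splitOn_prefix sep hsep l (by simpa using h)
  | succ j ih =>
    intro l h hmin
    cases l with
    | nil =>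
      rw [List.drop_nil] at h
      exact absurd (List.prefix_nil.mp h) hsep
    | cons c rest =>
      have hnp : ¬ sep <+: (c :: rest) := by
        have := hmin 0 (Nat.succ_pos j)
        simpa using this
      rw [splitOn_cons_not_prefix sep hsep c rest hnp]
      rw [ih rest (by simpa using h) (fun i hi => by simpa using hmin (i + 1) (by omega))]
      simp only [List.modifyHead, List.take_succ_cons, List.drop_succ_cons]
      rw [show j + 1 + sep.length = j + sep.length + 1 by omega]
      rfl

theorem join_splitOn (sep : List Char) (hsep : sep ≠ []) :
    ∀ (n : Nat) (l : List Char), l.length ≤ n →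
    PySem.Chars.join sep (PySem.Chars.splitOn l sep) = l := by
  intro n
  induction n with
  | zero =>
    intro l hl
    have : l = [] := by cases l <;> simp_all
    subst this
    rw [splitOn_nil sep hsep]
    simp [PySem.Chars.join_singleton]
  | succ n ih =>
    intro l hl
    by_cases hinf : sep <:+: l
    · have hf : PySem.Chars.find l sep ≠ -1 := (PySem.Chars.find_ne_neg_one_iff l sep).mpr hinf
      have hf0 : 0 ≤ PySem.Chars.find l sep := by
        rcases (PySem.Chars.neg_one_le_find l sep).lt_or_eq with h | h
        · omega
        · exact absurd h.symm hf
      obtain ⟨hpre, hmin⟩ := PySem.Chars.find_spec hf0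
      set j := (PySem.Chars.find l sep).toNat with hj
      have hsl : 1 ≤ sep.length := by
        cases sep with | nil => exact absurd rfl hsep | cons _ _ => simp
      have hjlen : j < l.length := by
        have h1 := List.IsPrefix.length_le hpre
        simp only [List.length_drop] at h1
        omega
      rw [splitOn_at_first sep hsep j l hpre hmin]
      obtain ⟨y, ys, hys⟩ : ∃ y ys, PySem.Chars.splitOn (l.drop (j + sep.length)) sep = y :: ys := by
        rcases hgo : PySem.Chars.splitOn (l.drop (j + sep.length)) sep with _ | ⟨y, ys⟩
        · exact absurd hgo (go_ne_nil sep _ _ _ _)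
        · exact ⟨y, ys, rfl⟩
      rw [hys, PySem.Chars.join_cons_cons, ← hys]
      rw [ih (l.drop (j + sep.length)) (by simp; omega)]
      obtain ⟨t, ht⟩ := hpre
      have hdd : List.drop sep.length (List.drop j l) = t := by
        rw [← ht]; simp
      rw [List.drop_drop] at hdd
      rw [hdd]
      conv_rhs => rw [← List.take_append_drop j l, ← ht]
      simp [List.append_assoc]
    · rw [splitOn_not_infix sep hsep l hinf]
      simp [PySem.Chars.join_singleton]

theorem pvJoin_toList : ∀ (l : List String),
    (pvJoin l).toList = PySem.Chars.join [':', ' '] (l.map String.toList) := by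
  intro l
  induction l with
  | nil => rfl
  | cons x t ih =>
    cases t with
    | nil => simp [pvJoin, PySem.Chars.join_singleton]
    | cons y t' =>
      simp only [pvJoin, List.map_cons]
      rw [PySem.Chars.join_cons_cons, String.toList_append, String.toList_append, ← List.map_cons]
      rw [ih]
      rfl

theorem fold_eval (a : List String) : ∀ (n : Nat), n ≤ a.length →
    (PySem.List.pyRange 0 (n : Int) 1).foldl
      (fun c i =>
        let c1 := if 1 < i then c ++ ": " else c
        if i ≠ 0 then c1 ++ PySem.List.pyGetD a i "" else c1) ""
    = pvJoin ((a.take n).drop 1) := by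
  intro n
  induction n with
  | zero => simp [PySem.List.pyRange_one_eq_nil, pvJoin]
  | succ n ih =>
    intro hn
    rw [show ((n + 1 : Nat) : Int) = (n : Int) + 1 by push_cast; ring]
    rw [PySem.List.pyRange_one_succ_right (a := 0) (b := (n : Int)) (by positivity)]
    rw [List.foldl_append]
    rw [ih (by omega)]
    match n, hn with
    | 0, hn =>
      simp only [Nat.cast_zero]
      norm_num
    | 1, hn =>
      simp only [Nat.cast_one, List.foldl_cons, List.foldl_nil]
      norm_num
      match a, hn with
      | x :: y :: t, _ =>
        simp [pvJoin, PySem.List.pyGetD, PySem.List.pyIdx?]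
    | (m + 2), hn =>
      simp only [List.foldl_cons, List.foldl_nil]
      rw [if_pos (by push_cast; omega), if_pos (by push_cast; omega)]
      have hget : PySem.List.pyGetD a ((m + 2 : Nat) : Int) "" = a[m + 2]'(by omega) := by
        rw [PySem.List.pyGetD_natCast]
        exact List.getD_eq_getElem a "" (by omega)
      rw [hget]
      have htake : a.take (m + 3) = a.take (m + 2) ++ [a[m + 2]'(by omega)] := by
        have h := List.take_concat_get (l := a) (i := m + 2) (by omega)
        rw [List.concat_eq_append] at h
        rw [show m + 3 = m + 2 + 1 by omega, ← h]
      rw [htake]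
      rw [List.drop_append_of_le_length (by simp; omega)]
      rw [pvJoin_append _ _ (by
        intro hnil
        have := congrArg List.length hnil
        simp at this
        omega)]

theorem besedilo_spec_aux (tvit : String) : besedilo tvit = besedilo_alt tvit := by
  have hsep : ([':', ' '] : List Char) ≠ [] := by simp
  have hsplit : (PySem.Str.split? tvit ": ").getD [] =
      (PySem.Chars.splitOn tvit.toList [':', ' ']).map String.ofList := by
    simp [PySem.Str.split?, PySem.Chars.split?]
  have hB : PySem.Str.find tvit ": " = PySem.Chars.find tvit.toList [':', ' '] := rfl
  unfold besedilo
  simp only [hsplit]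
  rw [fold_eval _ _ le_rfl]
  rw [List.take_length, ← List.map_drop]
  apply String.toList_inj.mp
  rw [pvJoin_toList, List.map_map,
    show (String.toList ∘ String.ofList) = id from funext (fun l => String.toList_ofList),
    List.map_id]
  by_cases hinf : ([':', ' '] : List Char) <:+: tvit.toList
  · -- separator present: both sides are the text after the first ": "
    have hf : PySem.Chars.find tvit.toList [':', ' '] ≠ -1 :=
      (PySem.Chars.find_ne_neg_one_iff _ _).mpr hinf
    have hf0 : 0 ≤ PySem.Chars.find tvit.toList [':', ' '] := by
      rcases (PySem.Chars.neg_one_le_find tvit.toList [':', ' ']).lt_or_eq with h | h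
      · omega
      · exact absurd h.symm hf
    obtain ⟨hpre, hmin⟩ := PySem.Chars.find_spec hf0
    set j := (PySem.Chars.find tvit.toList [':', ' ']).toNat with hj
    rw [splitOn_at_first [':', ' '] hsep j tvit.toList hpre hmin]
    rw [show (List.take j tvit.toList :: PySem.Chars.splitOn
        (List.drop (j + [':', ' '].length) tvit.toList) [':', ' ']).drop 1
      = PySem.Chars.splitOn (List.drop (j + [':', ' '].length) tvit.toList) [':', ' '] by simp]
    rw [join_splitOn [':', ' '] hsep (tvit.toList.length) _ (by simp)]
    unfold besedilo_alt
    rw [if_neg (by rw [hB]; exact hf)]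
    rw [PySem.Str.toList_slice]
    simp only [PySem.Chars.slice_eq_listSlice]
    rw [PySem.List.slice_from _ (by rw [hB]; omega)]
    rw [show (PySem.Str.find tvit ": " + 2).toNat = j + [':', ' '].length by rw [hB]; simp; omega]
  · -- no separator: both sides are ""
    have hf : PySem.Chars.find tvit.toList [':', ' '] = -1 :=
      (PySem.Chars.find_eq_neg_one_iff _ _).mpr hinf
    rw [splitOn_not_infix [':', ' '] hsep tvit.toList hinf]
    unfold besedilo_alt
    rw [if_pos (by rw [hB]; exact hf)]
    simp [PySem.Chars.join, List.intercalate]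

-- ===== VERDICT (by name: the statement is the Claim_ definition above) =====
theorem besedilo_spec : Claim_equal_besedilo := by
  intro tvit _
  unfold Spec_besedilo
  exact besedilo_spec_aux tvit
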